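-- pv_equiv track=rewrite | github.com/liangwj18/modelSecurity | security_model_cn/MultiData/NLU/Sentence.py | _generate
-- ===== SOURCE A (Python) =====
-- def _generate(combinations):
--     output = []
--     iters = []
--     size = 1
--     for i, combination in enumerate(combinations):
--         iters.append(0)
--         size *= len(combination)
--     for i in range(size):
--         sen = ""
--         for k in range(len(combinations)):
--             sen += combinations[k][iters[k]]
--         output.append(sen)
--
--         if i+1 < size:
--             iters[-1] += 1
--             for k in range(len(combinations)-1, -1 ,-1):
--                 if iters[k] == len(combinations[k]):
--                     iters[k] = 0
--                     iters[k-1] += 1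
--     return output
-- ===== SOURCE B (Python) =====
-- def _generate(combinations):
--     result = [""]
--     for combination in combinations:
--         result = [prefix + item for prefix in result for item in combination]
--     return result
-- ===== Notes on version B (the rewrite author's own statement) =====
-- stated objective: simpler
-- what changed: Replaces the mutable index-odometer (counter vector incremented with an explicit ripple-carry loop over a precomputed product size) by a single left fold that extends a list of partial concatenations with each inner list, yielding the same odometer order with no index bookkeeping.
import Mathlib
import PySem

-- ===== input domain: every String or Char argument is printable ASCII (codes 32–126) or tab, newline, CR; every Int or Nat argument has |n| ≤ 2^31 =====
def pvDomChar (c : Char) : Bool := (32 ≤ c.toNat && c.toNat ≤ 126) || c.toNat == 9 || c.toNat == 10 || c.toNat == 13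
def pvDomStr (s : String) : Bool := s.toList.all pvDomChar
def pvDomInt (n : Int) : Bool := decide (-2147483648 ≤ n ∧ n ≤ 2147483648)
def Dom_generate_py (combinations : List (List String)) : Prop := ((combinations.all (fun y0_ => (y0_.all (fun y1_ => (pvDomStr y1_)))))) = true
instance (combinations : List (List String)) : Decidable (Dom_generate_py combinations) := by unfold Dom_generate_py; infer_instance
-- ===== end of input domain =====

-- B replaces A's mutable index-odometer with ripple-carry by a single left fold extending
-- partial concatenations; same return value, simpler code (objective: simpler).

-- ===== PORT A =====
-- one carry step of the inner 'for k in range(len(combinations)-1, -1, -1)' loop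
def pvCarryStep (combinations : List (List String)) (iters : List Int) (k : Int) : List Int :=
  if PySem.List.pyGetD iters k 0 = ((PySem.List.pyGetD combinations k []).length : Int) then
    let iters := PySem.List.pySetD iters k 0
    PySem.List.pySetD iters (k - 1) (PySem.List.pyGetD iters (k - 1) 0 + 1)
  else iters
-- body of 'for i in range(size)'
def pvBody (combinations : List (List String)) (size : Int)
    (st : List String × List Int) (i : Int) : List String × List Int :=
  let sen := (PySem.List.pyRange 0 (combinations.length : Int) 1).foldl
      (fun sen k =>
        sen ++ PySem.List.pyGetD (PySem.List.pyGetD combinations k [])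
                 (PySem.List.pyGetD st.2 k 0) "") ""
  -- indices are in range on every reachable state (Python raises nowhere here)
  let output := st.1 ++ [sen]
  let iters :=
    if i + 1 < size then
      let iters := PySem.List.pySetD st.2 (-1) (PySem.List.pyGetD st.2 (-1) 0 + 1)
      (PySem.List.pyRange ((combinations.length : Int) - 1) (-1) (-1)).foldl
        (pvCarryStep combinations) iters
    else st.2
  (output, iters)

def generate_py (combinations : List (List String)) : List String :=
  let init := (PySem.List.enumerate combinations 0).foldl
      (fun (st : List Int × Int) ic => (st.1 ++ [(0 : Int)], st.2 * (ic.2.length : Int)))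
      ([], 1)
  let iters := init.1
  let size := init.2
  ((PySem.List.pyRange 0 size 1).foldl (pvBody combinations size) ([], iters)).1

-- ===== PORT B =====
def generate_py_alt (combinations : List (List String)) : List String :=
  combinations.foldl
    (fun result combination =>
      result.flatMap (fun pre => combination.map (fun item => pre ++ item)))
    [""]

-- ===== PRECONDITION & SPEC =====
def Spec_generate_py (combinations : List (List String)) (out : List String) : Prop := out = generate_py_alt combinations
instance (combinations : List (List String)) (out : List String) : Decidable (Spec_generate_py combinations out) := by unfold Spec_generate_py; infer_instance

-- ===== CLAIM (what is proved, stated in full; the proofs are below) =====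
def Claim_equal_generate_py : Prop := ∀ (combinations : List (List String)), Dom_generate_py combinations → Spec_generate_py combinations (generate_py combinations)

-- ===== LEMMAS AND PROOFS =====
-- ===== LEMMAS AND PROOFS =====
-- ===== proof development =====
def szN (cs : List (List String)) : Nat := (cs.map List.length).prod

def digitsI : List (List String) → Nat → List Int
  | [], _ => []
  | _ :: cs, j => ((j / szN cs : Nat) : Int) :: digitsI cs (j % szN cs)

def decode : List (List String) → Nat → String
  | [], _ => ""
  | c :: cs, j => (c.getD (j / szN cs) "") ++ decode cs (j % szN cs)

def prodR : List (List String) → List String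
  | [] => [""]
  | c :: cs => c.flatMap (fun x => (prodR cs).map (fun t => x ++ t))

theorem szN_cons (c : List String) (cs : List (List String)) :
    szN (c :: cs) = c.length * szN cs := by simp [szN]

-- B side
theorem foldl_prodR (cs : List (List String)) : ∀ acc : List String,
    cs.foldl (fun result combination =>
      result.flatMap (fun pre => combination.map (fun item => pre ++ item))) acc
    = acc.flatMap (fun p => (prodR cs).map (fun t => p ++ t)) := by
  induction cs with
  | nil => intro acc; simp [prodR]
  | cons c cs ih =>
      intro acc
      simp only [List.foldl_cons, ih, prodR]
      simp only [List.flatMap_assoc, List.flatMap_map]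
      simp [List.map_flatMap, List.map_map, Function.comp_def, String.append_assoc]

theorem alt_eq_prodR (cs : List (List String)) : generate_py_alt cs = prodR cs := by
  simp [generate_py_alt, foldl_prodR]

theorem length_prodR (cs : List (List String)) : (prodR cs).length = szN cs := by
  induction cs with
  | nil => simp [prodR, szN]
  | cons c cs ih => simp [prodR, szN, ih, List.length_flatMap]

theorem block_map {α β : Type} (d : α) (f : α → Nat → β) (m : Nat) (hm : 0 < m) (c : List α) :
    c.flatMap (fun x => (List.range m).map (f x))
    = (List.range (c.length * m)).map (fun j => f (c.getD (j / m) d) (j % m)) := by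
  induction c with
  | nil => simp
  | cons x c ih =>
      rw [List.flatMap_cons, ih]
      have h1 : (x :: c).length * m = m + c.length * m := by
        simp [Nat.succ_mul, Nat.add_comm]
      rw [h1, List.range_add, List.map_append, List.map_map]
      congr 1
      · apply List.map_congr_left; intro j hj
        simp only [List.mem_range] at hj
        simp [Nat.div_eq_of_lt hj, Nat.mod_eq_of_lt hj]
      · apply List.map_congr_left; intro j hj
        have e1 : (m + j) / m = j / m + 1 := by
          rw [Nat.add_comm m j, Nat.add_div_right _ hm]
        have e2 : (m + j) % m = j % m := Nat.add_mod_left m j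
        simp [Function.comp, e1, e2]

theorem prodR_eq_map (cs : List (List String)) :
    prodR cs = (List.range (szN cs)).map (decode cs) := by
  induction cs with
  | nil => simp [prodR, szN, decode]
  | cons c cs ih =>
      rcases Nat.eq_zero_or_pos (szN cs) with hm | hm
      · have h0 : prodR cs = [] := List.eq_nil_of_length_eq_zero (by rw [length_prodR, hm])
        simp [prodR, szN_cons, h0, hm]
      · rw [prodR, ih, szN_cons]
        simp only [List.map_map]
        rw [block_map "" (fun x => (fun t => x ++ t) ∘ decode cs) _ hm]
        apply List.map_congr_left; intro j _
        simp [decode, Function.comp]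

-- A side: first loop
theorem init_eq (cs : List (List String)) : ∀ (acc : List Int) (s : Int) (st : Nat),
    ((PySem.List.enumerate cs st).foldl
      (fun (st : List Int × Int) ic => (st.1 ++ [(0 : Int)], st.2 * (ic.2.length : Int)))
      (acc, s))
    = (acc ++ List.replicate cs.length 0, s * (szN cs : Int)) := by
  induction cs with
  | nil => intro acc s st; simp [PySem.List.enumerate, szN]
  | cons c cs ih =>
      intro acc s st
      rw [PySem.List.enumerate_cons, List.foldl_cons,
        show ((st : Int) + 1) = ((st + 1 : Nat) : Int) by push_cast; ring, ih]
      rw [szN_cons]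
      refine Prod.ext ?_ ?_
      · simp [List.replicate_succ, List.append_assoc]
      · push_cast; ring

theorem length_digitsI (cs : List (List String)) (j : Nat) : (digitsI cs j).length = cs.length := by
  induction cs generalizing j with
  | nil => simp [digitsI]
  | cons c cs ih => simp [digitsI, ih]

theorem digitsI_zero (cs : List (List String)) : digitsI cs 0 = List.replicate cs.length 0 := by
  induction cs with
  | nil => simp [digitsI]
  | cons c cs ih => simp [digitsI, ih, List.replicate_succ]

theorem digitsI_bound (cs : List (List String)) (j : Nat) (hj : j < szN cs) :
    ∀ i < cs.length, 0 ≤ (digitsI cs j).getD i 0 ∧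
      (digitsI cs j).getD i 0 < ((cs.getD i []).length : Int) := by
  induction cs generalizing j with
  | nil => simp
  | cons c cs ih =>
      rw [szN_cons] at hj
      have hm : 0 < szN cs := by
        rcases Nat.eq_zero_or_pos (szN cs) with h0 | h
        · rw [h0, Nat.mul_zero] at hj; omega
        · exact h
      intro i hi
      cases i with
      | zero =>
          simp only [digitsI, List.getD_cons_zero, List.getD_cons_zero]
          refine ⟨by positivity, ?_⟩
          have : j / szN cs < c.length := (Nat.div_lt_iff_lt_mul hm).mpr (by omega)
          exact_mod_cast this
      | succ i =>
          simp only [digitsI, List.getD_cons_succ, List.getD_cons_succ]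
          exact ih (j % szN cs) (Nat.mod_lt _ hm) i (by simpa using hi)

theorem digitsI_max (cs : List (List String)) (h : 0 < szN cs) :
    ∀ i < cs.length, (digitsI cs (szN cs - 1)).getD i 0 = ((cs.getD i []).length : Int) - 1 := by
  induction cs with
  | nil => simp
  | cons c cs ih =>
      have h' := h; rw [szN_cons] at h'
      have hm : 0 < szN cs := by
        rcases Nat.eq_zero_or_pos (szN cs) with h0 | h1
        · rw [h0, Nat.mul_zero] at h'; omega
        · exact h1
      have hl : 0 < c.length := by
        rcases Nat.eq_zero_or_pos c.length with h0 | h1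
        · rw [h0, Nat.zero_mul] at h'; omega
        · exact h1
      have e : c.length * szN cs - 1 = (szN cs - 1) + szN cs * (c.length - 1) := by
        have h2 : c.length * szN cs = szN cs * (c.length - 1) + szN cs := by
          obtain ⟨k, hk⟩ : ∃ k, c.length = k + 1 := ⟨c.length - 1, by omega⟩
          rw [hk]
          simp [Nat.mul_add, Nat.mul_comm]
        omega
      have ediv : (c.length * szN cs - 1) / szN cs = c.length - 1 := by
        rw [e, Nat.add_mul_div_left _ _ hm, Nat.div_eq_of_lt (by omega)]; omega
      have emod : (c.length * szN cs - 1) % szN cs = szN cs - 1 := by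
        rw [e, Nat.add_mul_mod_self_left, Nat.mod_eq_of_lt (by omega)]
      have hgoal : szN (c :: cs) - 1 = c.length * szN cs - 1 := by rw [szN_cons]
      have hd : digitsI (c :: cs) (szN (c :: cs) - 1)
          = (((szN (c :: cs) - 1) / szN cs : Nat) : Int)
            :: digitsI cs ((szN (c :: cs) - 1) % szN cs) := rfl
      intro i hi
      cases i with
      | zero =>
          rw [hd, List.getD_cons_zero, hgoal, ediv]
          simp only [List.getD_cons_zero]
          omega
      | succ i =>
          rw [hd, List.getD_cons_succ, hgoal, emod, List.getD_cons_succ]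
          exact ih hm i (by simpa using hi)

-- successor structure
theorem digitsI_succ (cs : List (List String)) (j : Nat) (hj : j + 1 < szN cs) :
    ∃ q < cs.length,
      digitsI cs (j + 1)
        = (digitsI cs j).take q ++ [(digitsI cs j).getD q 0 + 1]
            ++ List.replicate (cs.length - 1 - q) 0 ∧
      ∀ i, q < i → i < cs.length →
        (digitsI cs j).getD i 0 = ((cs.getD i []).length : Int) - 1 := by
  induction cs generalizing j with
  | nil => simp [szN] at hj
  | cons c cs ih =>
      rw [szN_cons] at hj
      have hm : 0 < szN cs := by
        rcases Nat.eq_zero_or_pos (szN cs) with h0 | h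
        · rw [h0, Nat.mul_zero] at hj; omega
        · exact h
      set m := szN cs with hmdef
      have hdm := Nat.div_add_mod j m
      have hdL1 : digitsI (c :: cs) (j + 1) = (((j + 1) / m : Nat) : Int) :: digitsI cs ((j + 1) % m) := rfl
      have hdL0 : digitsI (c :: cs) j = ((j / m : Nat) : Int) :: digitsI cs (j % m) := rfl
      by_cases hr : j % m + 1 < m
      · obtain ⟨q', hq', htl, hmax'⟩ := ih (j % m) (by omega)
        have e1 : (j + 1) / m = j / m := by
          have hx : j + 1 = m * (j / m) + (j % m + 1) := by omega
          rw [hx, Nat.mul_add_div hm, Nat.div_eq_of_lt hr, Nat.add_zero]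
        have e2 : (j + 1) % m = j % m + 1 := by
          have hx : j + 1 = m * (j / m) + (j % m + 1) := by omega
          rw [hx, Nat.mul_add_mod, Nat.mod_eq_of_lt hr]
        refine ⟨q' + 1, by simp; omega, ?_, ?_⟩
        · rw [hdL1, hdL0, e1, e2, htl, List.take_succ_cons, List.getD_cons_succ]
          rw [show (c :: cs).length - 1 - (q' + 1) = cs.length - 1 - q' by simp; omega]
          simp [List.cons_append]
        · intro i h1 h2
          cases i with
          | zero => omega
          | succ i =>
              rw [hdL0, List.getD_cons_succ, List.getD_cons_succ]
              exact hmax' i (by omega) (by simpa using h2)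
      · have hr2 : j % m = m - 1 := by have := Nat.mod_lt j hm; omega
        have hx : j + 1 = m * (j / m + 1) := by
          have := Nat.mod_lt j hm; rw [Nat.mul_add, Nat.mul_one]; omega
        have e1 : (j + 1) / m = j / m + 1 := by
          rw [hx, Nat.mul_div_cancel_left _ hm]
        have e2 : (j + 1) % m = 0 := by rw [hx, Nat.mul_mod_right]
        refine ⟨0, by simp, ?_, ?_⟩
        · rw [hdL1, hdL0, e1, e2, digitsI_zero, List.take_zero, List.getD_cons_zero]
          rw [show (c :: cs).length - 1 - 0 = cs.length by simp]
          push_cast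
          simp
        · intro i h1 h2
          cases i with
          | zero => omega
          | succ i =>
              rw [hdL0, List.getD_cons_succ, List.getD_cons_succ, hr2]
              exact digitsI_max cs hm i (by simpa using h2)

-- sen
theorem sen_eq (cs : List (List String)) : ∀ (j : Nat) (acc : String),
    (List.range cs.length).foldl
      (fun sen k => sen ++ PySem.List.pyGetD (cs.getD k []) ((digitsI cs j).getD k 0) "") acc
    = acc ++ decode cs j := by
  induction cs with
  | nil => intro j acc; simp [decode]
  | cons c cs ih =>
      intro j acc
      rw [List.length_cons, List.range_succ_eq_map, List.foldl_cons, List.foldl_map]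
      simp only [List.getD_cons_zero, List.getD_cons_succ, digitsI]
      rw [show (PySem.List.pyGetD c (((j / szN cs : Nat) : Int)) "") = c.getD (j / szN cs) "" from
        PySem.List.pyGetD_natCast c _ ""]
      rw [ih (j % szN cs)]
      simp [decode, String.append_assoc]

-- set at -1 (Python wraparound for the last element)
theorem pySetD_neg_one {α : Type} (xs : List α) (h : xs ≠ []) (v : α) :
    PySem.List.pySetD xs (-1) v = xs.set (xs.length - 1) v := by
  have hl : 1 ≤ xs.length := List.length_pos_iff.mpr h
  simp [PySem.List.pySetD, PySem.List.pySet?, PySem.List.pyIdx?, hl]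

-- intermediate state of the ripple-carry loop
def Tmid (D : List Int) (n k : Nat) : List Int :=
  D.take k ++ [D.getD k 0 + 1] ++ List.replicate (n - 1 - k) 0

theorem length_Tmid (D : List Int) (n k : Nat) (hk : k < n) (hD : D.length = n) :
    (Tmid D n k).length = n := by
  unfold Tmid; simp [hD]; omega

theorem getElem?_Tmid (D : List Int) (n k i : Nat) (hk : k < n) (hD : D.length = n) :
    (Tmid D n k)[i]?
      = if i < k then D[i]?
        else if i = k then some (D.getD k 0 + 1)
        else if i < n then some (0 : Int) else none := by
  unfold Tmid
  have ht : (D.take k).length = k := by simp [hD]; omega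
  rcases lt_trichotomy i k with h | h | h
  · rw [List.append_assoc, List.getElem?_append_left (by omega)]
    simp [h]
  · subst h
    rw [List.append_assoc, List.getElem?_append_right (by omega), ht]
    simp
  · rw [List.append_assoc, List.getElem?_append_right (by omega), ht]
    have h1 : ¬ (i < k) := by omega
    have h2 : ¬ (i = k) := by omega
    rcases Nat.exists_eq_add_of_lt h with ⟨u, hu⟩
    have hik : i - k = u + 1 := by omega
    rw [hik, List.singleton_append, List.getElem?_cons_succ, List.getElem?_replicate]
    split_ifs <;> first | rfl | omega

theorem getD_Tmid (D : List Int) (n k i : Nat) (hk : k < n) (hD : D.length = n) :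
    (Tmid D n k).getD i 0
      = if i < k then D.getD i 0 else if i = k then D.getD k 0 + 1 else (0 : Int) := by
  rw [List.getD_eq_getElem?_getD, getElem?_Tmid D n k i hk hD]
  split_ifs with h1 h2 h3 <;> simp [List.getD_eq_getElem?_getD]

theorem carry_noop (cs : List (List String)) (E : List Int)
    (hE : ∀ i < cs.length, E.getD i 0 ≠ ((cs.getD i []).length : Int)) :
    ∀ k : Nat, k ≤ cs.length →
      (PySem.List.pyRange ((k : Int) - 1) (-1) (-1)).foldl (pvCarryStep cs) E = E := by
  intro k
  induction k with
  | zero =>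
      intro _
      rw [show ((0 : Nat) : Int) - 1 = -1 by norm_num, PySem.List.pyRange_neg_one_eq_nil le_rfl,
        List.foldl_nil]
  | succ k ih =>
      intro hk
      rw [show ((k + 1 : Nat) : Int) - 1 = (k : Int) by push_cast; ring,
        PySem.List.pyRange_neg_one_cons (by omega), List.foldl_cons]
      have hstep : pvCarryStep cs E (k : Int) = E := by
        unfold pvCarryStep
        rw [PySem.List.pyGetD_natCast, PySem.List.pyGetD_natCast]
        rw [if_neg (hE k (by omega))]
      rw [hstep]
      exact ih (by omega)

theorem carry_fold (cs : List (List String)) (D : List Int) (q : Nat)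
    (hlen : D.length = cs.length) (hq : q < cs.length)
    (hmax : ∀ i, q < i → i < cs.length → D.getD i 0 = ((cs.getD i []).length : Int) - 1)
    (hne : ∀ i < cs.length, (Tmid D cs.length q).getD i 0 ≠ ((cs.getD i []).length : Int)) :
    ∀ k : Nat, q ≤ k → k < cs.length →
      (PySem.List.pyRange (k : Int) (-1) (-1)).foldl (pvCarryStep cs) (Tmid D cs.length k)
        = Tmid D cs.length q := by
  intro k
  induction k with
  | zero =>
      intro hq0 hk0
      have hq' : q = 0 := by omega
      subst hq'
      rw [PySem.List.pyRange_neg_one_cons (by norm_num), List.foldl_cons]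
      have hstep : pvCarryStep cs (Tmid D cs.length 0) ((0 : Nat) : Int) = Tmid D cs.length 0 := by
        unfold pvCarryStep
        rw [PySem.List.pyGetD_natCast, PySem.List.pyGetD_natCast,
          if_neg (hne 0 (by omega))]
      rw [hstep]
      exact carry_noop cs _ hne 0 (by omega)
  | succ k ih =>
      intro hqk hk
      rw [PySem.List.pyRange_neg_one_cons (by omega), List.foldl_cons]
      by_cases hcase : q = k + 1
      · -- no trigger at k+1 = q, remaining loop is a no-op
        subst hcase
        have hstep : pvCarryStep cs (Tmid D cs.length (k + 1)) ((k + 1 : Nat) : Int)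
            = Tmid D cs.length (k + 1) := by
          unfold pvCarryStep
          rw [PySem.List.pyGetD_natCast, PySem.List.pyGetD_natCast,
            if_neg (hne (k + 1) hk)]
        rw [hstep, show ((k + 1 : Nat) : Int) - 1 = ((k + 1 : Nat) : Int) - 1 from rfl]
        have := carry_noop cs _ hne (k + 1) (by omega)
        rw [show ((k + 1 : Nat) : Int) - 1 = ((k + 1 : Nat) : Int) - 1 from rfl]
        exact this
      · -- trigger: position k+1 overflows, carry to position k
        have hqk' : q ≤ k := by omega
        have hne' := hmax (k + 1) (by omega) hk
        have hlT : (Tmid D cs.length (k + 1)).length = cs.length := length_Tmid _ _ _ hk hlen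
        have hstep : pvCarryStep cs (Tmid D cs.length (k + 1)) ((k + 1 : Nat) : Int)
            = Tmid D cs.length k := by
          unfold pvCarryStep
          simp only [PySem.List.pyGetD_natCast, PySem.List.pySetD_natCast]
          have hv : (Tmid D cs.length (k + 1)).getD (k + 1) 0 = D.getD (k + 1) 0 + 1 := by
            rw [getD_Tmid D cs.length (k + 1) (k + 1) hk hlen,
              if_neg (by omega : ¬ (k + 1 < k + 1)), if_pos rfl]
          rw [hv, if_pos (show D.getD (k + 1) 0 + 1 = ((cs.getD (k + 1) []).length : Int) by omega)]
          rw [show ((k + 1 : Nat) : Int) - 1 = ((k : Nat) : Int) by push_cast; ring]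
          simp only [PySem.List.pySetD_natCast, PySem.List.pyGetD_natCast]
          have hg : ((Tmid D cs.length (k + 1)).set (k + 1) 0).getD k 0 = D.getD k 0 := by
            rw [List.getD_eq_getElem?_getD, List.getElem?_set_ne (by omega),
              getElem?_Tmid D cs.length (k + 1) k (by omega) hlen, if_pos (by omega),
              ← List.getD_eq_getElem?_getD]
          rw [hg]
          apply List.ext_getElem?
          intro i
          rw [getElem?_Tmid D cs.length k i (by omega) hlen]
          have hsl : ((Tmid D cs.length (k + 1)).set (k + 1) 0).length = cs.length := by
            rw [List.length_set, hlT]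
          rcases Nat.lt_trichotomy i k with hik | hik | hik
          · rw [if_pos hik, List.getElem?_set_ne (by omega), List.getElem?_set_ne (by omega),
              getElem?_Tmid D cs.length (k + 1) i (by omega) hlen, if_pos (by omega)]
          · subst hik
            rw [if_neg (by omega), if_pos rfl]
            exact List.getElem?_set_self (by omega)
          · rw [if_neg (by omega), if_neg (by omega), List.getElem?_set_ne (by omega)]
            by_cases hik1 : i = k + 1
            · subst hik1
              rw [List.getElem?_set_self (by omega)]
              exact (if_pos hk).symm
            · rw [List.getElem?_set_ne (by omega),
                getElem?_Tmid D cs.length (k + 1) i (by omega) hlen,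
                if_neg (by omega), if_neg (by omega)]
        rw [hstep, show ((k + 1 : Nat) : Int) - 1 = (k : Int) by push_cast; ring]
        exact ih hqk' (by omega)


theorem carry_run (cs : List (List String)) (j : Nat) (hj : j + 1 < szN cs) :
    (PySem.List.pyRange ((cs.length : Int) - 1) (-1) (-1)).foldl (pvCarryStep cs)
      (PySem.List.pySetD (digitsI cs j) (-1) (PySem.List.pyGetD (digitsI cs j) (-1) 0 + 1))
    = digitsI cs (j + 1) := by
  have hn : 0 < cs.length := by
    rcases cs with _ | ⟨c, cs⟩
    · simp [szN] at hj
    · simp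
  obtain ⟨q, hq, hform, hmax⟩ := digitsI_succ cs j hj
  have hlen : (digitsI cs j).length = cs.length := length_digitsI cs j
  have hne0 : digitsI cs j ≠ [] := by
    intro hcon; rw [hcon] at hlen; simp at hlen; omega
  have hstart : PySem.List.pySetD (digitsI cs j) (-1)
        (PySem.List.pyGetD (digitsI cs j) (-1) 0 + 1)
      = Tmid (digitsI cs j) cs.length (cs.length - 1) := by
    rw [PySem.List.pyGetD_neg_one _ 0 hne0, pySetD_neg_one _ hne0]
    have hgl : (digitsI cs j).getLast hne0 = (digitsI cs j).getD (cs.length - 1) 0 := by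
      rw [List.getLast_eq_getElem, List.getD_eq_getElem _ _ (by omega)]
      simp [hlen]
    rw [hgl]
    unfold Tmid
    rw [List.set_eq_take_append_cons_drop, if_pos (by omega), hlen]
    rw [List.drop_eq_nil_of_le (by omega)]
    simp
  have hfin : Tmid (digitsI cs j) cs.length q = digitsI cs (j + 1) := by
    unfold Tmid; exact hform.symm
  have hne : ∀ i < cs.length,
      (Tmid (digitsI cs j) cs.length q).getD i 0 ≠ ((cs.getD i []).length : Int) := by
    intro i hi
    rw [hfin]
    have := digitsI_bound cs (j + 1) hj i hi
    omega
  rw [hstart, show ((cs.length : Int) - 1) = ((cs.length - 1 : Nat) : Int) by omega]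
  rw [carry_fold cs (digitsI cs j) q hlen hq hmax hne (cs.length - 1) (by omega) (by omega)]
  exact hfin

theorem loop_run (cs : List (List String)) :
    ∀ (t j : Nat) (out : List String), j + t = szN cs →
    ((List.range' j t).foldl
        (fun st (k : Nat) => pvBody cs ((szN cs : Nat) : Int) st ((0 : Int) + (k : Int)))
        (out, digitsI cs j)).1
    = out ++ (List.range' j t).map (decode cs) := by
  intro t
  induction t with
  | zero => intro j out h; simp
  | succ t ih =>
      intro j out h
      rw [List.range'_succ, List.foldl_cons, List.map_cons]
      have hsen : pvBody cs ((szN cs : Nat) : Int) (out, digitsI cs j) ((0 : Int) + (j : Int))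
          = (out ++ [decode cs j],
             if (0 : Int) + (j : Int) + 1 < ((szN cs : Nat) : Int)
             then (PySem.List.pyRange ((cs.length : Int) - 1) (-1) (-1)).foldl (pvCarryStep cs)
                    (PySem.List.pySetD (digitsI cs j) (-1)
                      (PySem.List.pyGetD (digitsI cs j) (-1) 0 + 1))
             else digitsI cs j) := by
        unfold pvBody
        rw [PySem.List.pyRange_one]
        simp only [Int.sub_zero, Int.toNat_natCast, List.foldl_map, zero_add,
          PySem.List.pyGetD_natCast]
        rw [sen_eq cs j ""]
        rw [String.empty_append]
      rw [hsen]
      by_cases hlt : j + 1 < szN cs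
      · rw [if_pos (by omega), carry_run cs j hlt]
        rw [ih (j + 1) (out ++ [decode cs j]) (by omega)]
        simp
      · have ht0 : t = 0 := by omega
        subst ht0
        rw [if_neg (by omega)]
        simp

theorem main_thm (cs : List (List String)) : generate_py cs = generate_py_alt cs := by
  rw [alt_eq_prodR, prodR_eq_map]
  simp only [generate_py]
  rw [show PySem.List.enumerate cs 0 = PySem.List.enumerate cs ((0 : Nat) : Int) from rfl,
    init_eq cs [] 1 0]
  simp only [List.nil_append, one_mul]
  rcases Nat.eq_zero_or_pos (szN cs) with hz | hpos
  · rw [hz]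
    rw [PySem.List.pyRange_one_eq_nil (by norm_num)]
    simp
  · rw [PySem.List.pyRange_one]
    simp only [Int.sub_zero, Int.toNat_natCast, List.foldl_map]
    rw [List.range_eq_range', ← digitsI_zero]
    rw [loop_run cs (szN cs) 0 [] (by omega)]
    rw [← List.range_eq_range']
    simp

-- ===== VERDICT (by name: the statement is the Claim_ definition above) =====
theorem generate_py_spec : Claim_equal_generate_py := by
  intro cs _
  show generate_py cs = generate_py_alt cs
  exact main_thm cs
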